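-- pv_equiv track=rewrite | github.com/brandonhippe/Advent-of-Code-2023 | python/7.py | part2
-- ===== SOURCE A (Python) =====
-- from itertools import product
--
-- def part2(data):
--     """ 2023 Day 7 Part 2
--
--     >>> part2(['32T3K 765', 'T55J5 684', 'KK677 28', 'KTJJT 220', 'QQQJA 483'])
--     5905
--     """
--
--     hands = []
--     bets = {}
--
--     for line in data:
--         hand, bet = line.split(' ')
--         hand = tuple(cardVals_P2[c] for c in hand)
--
--         hands.append(hand)
--         bets[hand] = int(bet)
--
--     hands.sort(key=handsort_P2)
--
--     return sum((i + 1) * bets[h] for i, h in enumerate(hands))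
--
-- cardVals_P2 = {'A': 14, 'K': 13, 'Q': 12, 'J': 1, 'T': 10, '9': 9, '8': 8, '7': 7, '6': 6, '5': 5, '4': 4, '3': 3, '2': 2}
--
-- handScores = [(1, 1, 1, 1, 1), (1, 1, 1, 2), (1, 2, 2), (1, 1, 3), (2, 3), (1, 4), (5,)]
--
-- def handsort_P2(hand):
--     handScore = 0
--     cardCounts = [len([n for n in hand if n == c]) for c in set(hand) if c != 1]
--
--     for p in product(range(len(cardCounts)), repeat=5-sum(cardCounts)):
--         potHand = cardCounts[:]
--         for ix in p:
--             potHand[ix] += 1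
--
--         handScore = max(handScore, handScores.index(tuple(sorted(potHand))) + 1)
--
--     if len(cardCounts) == 0:
--         handScore = 7
--
--     for c in hand:
--         handScore *= 100
--         handScore += c
--
--     return handScore
-- ===== SOURCE B (Python) =====
-- CARD_VALS = {'A': 14, 'K': 13, 'Q': 12, 'J': 1, 'T': 10, '9': 9, '8': 8, '7': 7,
--              '6': 6, '5': 5, '4': 4, '3': 3, '2': 2}
--
--
-- def joker_key(vals):
--     """Sort key: greedy hand type (jokers join the biggest group), then the
--     card values packed in base 100."""
--     counts = sorted(vals.count(c) for c in set(vals) if c != 1)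
--     if counts:
--         top = counts[-1] + 5 - sum(counts)   # jokers fill the hand up to 5 cards
--         if top == 5:
--             t = 7
--         elif top == 4:
--             t = 6
--         elif top == 3:
--             t = 5 if counts[-2] == 2 else 4
--         elif top == 2:
--             t = 3 if counts[-2] == 2 else 2
--         else:
--             t = 1
--     else:
--         t = 7                                # all jokers: five of a kind
--     key = t
--     for v in vals:
--         key = key * 100 + v
--     return key
--
--
-- def part2(data):
--     """ 2023 Day 7 Part 2
--
--     >>> part2(['32T3K 765', 'T55J5 684', 'KK677 28', 'KTJJT 220', 'QQQJA 483'])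
--     5905
--     """
--     rows = []
--     for line in data:
--         hand, bet = line.split(' ')
--         rows.append((joker_key([CARD_VALS[c] for c in hand]), int(bet)))
--     rows.sort(key=lambda r: r[0])
--     return sum((i + 1) * bet for i, (key, bet) in enumerate(rows))
-- ===== Notes on version B (the rewrite author's own statement) =====
-- stated objective: simpler
-- what changed: Replaces the brute-force enumeration of all joker placements (itertools.product over count positions, taking the max table index) with a direct greedy classification: add the jokers to the largest non-joker count and read the hand type off an if-chain; the hand->bet dict keyed by card tuples is replaced by per-line (key, bet) pairs sorted by key.
-- outside the precondition, e.g. on part2(['22222 1', '22222 9']): A returns 27, B returns 19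
import Mathlib
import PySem

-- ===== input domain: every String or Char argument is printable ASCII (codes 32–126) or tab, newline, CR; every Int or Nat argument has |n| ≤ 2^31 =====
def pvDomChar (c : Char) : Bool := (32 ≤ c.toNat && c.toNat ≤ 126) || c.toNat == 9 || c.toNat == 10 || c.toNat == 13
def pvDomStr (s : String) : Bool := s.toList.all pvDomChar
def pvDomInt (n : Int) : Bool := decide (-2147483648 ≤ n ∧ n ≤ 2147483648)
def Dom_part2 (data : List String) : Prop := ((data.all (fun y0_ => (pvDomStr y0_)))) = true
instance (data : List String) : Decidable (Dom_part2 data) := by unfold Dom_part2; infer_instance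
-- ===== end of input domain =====

-- B replaces A's brute-force enumeration of joker placements by a greedy classification
-- (jokers join the largest count) and per-line (key, bet) pairs instead of a hand-keyed dict:
-- simpler, same values on Pre_ (well-formed lines, no duplicate hands).

-- ===== PORT A =====

def cardVals : PySem.Dict Char Int :=
  PySem.Dict.ofList [('A', 14), ('K', 13), ('Q', 12), ('J', 1), ('T', 10), ('9', 9),
    ('8', 8), ('7', 7), ('6', 6), ('5', 5), ('4', 4), ('3', 3), ('2', 2)]

def handScoresA : List (List Int) :=
  [[1, 1, 1, 1, 1], [1, 1, 1, 2], [1, 2, 2], [1, 1, 3], [2, 3], [1, 4], [5]]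

-- itertools.product(range(n), repeat=r), in CPython's order (leftmost varies slowest)
def prodRange (n : Nat) : Nat → List (List Nat)
  | 0 => [[]]
  | r + 1 => (List.range n).flatMap (fun i => (prodRange n r).map (fun rest => i :: rest))

def handsortA (hand : List Int) : Int :=
  -- iterates set(hand); the final value does not depend on the iteration order
  let cardCounts : List Int :=
    ((PySem.Set.ofList hand).filter (fun c => c != 1)).map
      (fun c => ((hand.filter (fun n => n == c)).length : Int))
  -- Python raises ValueError when repeat = 5 - sum < 0 and when .index misses; Pre_ excludes
  -- those inputs, .toNat / .getD 0 are only totalizers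
  let handScore : Int :=
    (prodRange cardCounts.length (5 - cardCounts.sum).toNat).foldl
      (fun hs p =>
        let potHand := p.foldl (fun l ix => l.modify ix (· + 1)) cardCounts
        max hs (((PySem.List.index? handScoresA
          (PySem.List.sorted potHand (fun x => x) false)).getD 0 : Int) + 1))
      0
  let handScore := if cardCounts.length = 0 then 7 else handScore
  hand.foldl (fun hs c => hs * 100 + c) handScore

def part2 (data : List String) : Int :=
  -- 'hand, bet = line.split(' ')' raises unless exactly 2 parts, cardVals[c] raises KeyError,
  -- int(bet) raises ValueError — all excluded by Pre_; the .getD are only totalizers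
  let st := data.foldl
    (fun (st : List (List Int) × PySem.Dict (List Int) Int) line =>
      let parts := (PySem.Str.split? line " ").getD []
      let hand := (parts.getD 0 "").toList.map (fun c => PySem.Dict.getD cardVals c 0)
      (st.1 ++ [hand], st.2.insert hand ((PySem.Int.ofStr? (parts.getD 1 "")).getD 0)))
    ([], PySem.Dict.empty)
  let hands := PySem.List.sorted st.1 handsortA false
  ((PySem.List.enumerate hands).map (fun p => (p.1 + 1) * st.2.getD p.2 0)).sum

-- ===== PORT B =====

-- Source B's CARD_VALS is the same literal table as A's cardVals_P2; ported once as cardVals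
def jokerKey (vals : List Int) : Int :=
  -- iterates set(vals); sorted immediately, so the result ignores the iteration order
  let counts : List Int :=
    PySem.List.sorted
      (((PySem.Set.ofList vals).filter (fun c => c != 1)).map
        (fun c => (PySem.List.count vals c : Int)))
      (fun x => x) false
  let t : Int :=
    if counts.isEmpty then 7
    else
      let top := (PySem.List.pyGet? counts (-1)).getD 0 + 5 - counts.sum
      if top == 5 then 7
      else if top == 4 then 6
      else if top == 3 then (if (PySem.List.pyGet? counts (-2)).getD 0 == 2 then 5 else 4)
      else if top == 2 then (if (PySem.List.pyGet? counts (-2)).getD 0 == 2 then 3 else 2)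
      else 1
  vals.foldl (fun k v => k * 100 + v) t

def part2_alt (data : List String) : Int :=
  let rows := data.foldl
    (fun (rows : List (Int × Int)) line =>
      let parts := (PySem.Str.split? line " ").getD []
      rows ++ [(jokerKey ((parts.getD 0 "").toList.map (fun c => PySem.Dict.getD cardVals c 0)),
                (PySem.Int.ofStr? (parts.getD 1 "")).getD 0)])
    []
  let rows := PySem.List.sorted rows (fun r => r.1) false
  ((PySem.List.enumerate rows).map (fun p => (p.1 + 1) * p.2.2)).sum

-- ===== PRECONDITION & SPEC =====

def validCards : List Char := ['A', 'K', 'Q', 'J', 'T', '9', '8', '7', '6', '5', '4', '3', '2']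

-- Pre_ excludes (i) inputs on which A raises: lines that do not split into exactly 'hand bet'
-- (unpacking ValueError), hands with a character outside the 13 card symbols (KeyError),
-- non-integer bets (ValueError), and hands with more than 5 non-joker cards
-- (product(..., repeat=negative) ValueError); and (ii) inputs with duplicate hands, where A's
-- dict overwrite accidentally scores every copy with the last duplicate's bet (a corner of
-- dict key reinsertion; B keeps each line's own bet).
def Pre_part2 (data : List String) : Prop :=
  (∀ line ∈ data,
      ((PySem.Str.split? line " ").getD []).length = 2 ∧
      ((((PySem.Str.split? line " ").getD []).getD 0 "").toList.all
        (fun c => decide (c ∈ validCards))) = true ∧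
      (PySem.Int.ofStr? (((PySem.Str.split? line " ").getD []).getD 1 "")).isSome = true ∧
      ((((PySem.Str.split? line " ").getD []).getD 0 "").toList.filter
        (fun c => c ≠ 'J')).length ≤ 5) ∧
  (data.map (fun line => ((PySem.Str.split? line " ").getD []).getD 0 "")).Nodup

instance (data : List String) : Decidable (Pre_part2 data) := by
  unfold Pre_part2; infer_instance

def pvWitness_part2 : List String :=
  ["32T3K 765", "T55J5 684", "KK677 28", "KTJJT 220", "QQQJA 483"]

def Spec_part2 (data : List String) (out : Int) : Prop := out = part2_alt data
instance (data : List String) (out : Int) : Decidable (Spec_part2 data out) := by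
  unfold Spec_part2; infer_instance

-- ===== CLAIM (what is proved, stated in full; the proofs are below) =====
def Claim_equal_part2 : Prop :=
  ∀ (data : List String), Dom_part2 data → Pre_part2 data → Spec_part2 data (part2 data)

-- ===== LEMMAS AND PROOFS =====

def scoreA (cs : List Int) : Int :=
  if cs.length = 0 then 7 else
    (prodRange cs.length (5 - cs.sum).toNat).foldl
      (fun hs p =>
        let potHand := p.foldl (fun l ix => l.modify ix (· + 1)) cs
        max hs (((PySem.List.index? handScoresA
          (PySem.List.sorted potHand (fun x => x) false)).getD 0 : Int) + 1))
      0

def scoreB (counts : List Int) : Int :=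
  if counts.isEmpty then 7
  else
    let top := (PySem.List.pyGet? counts (-1)).getD 0 + 5 - counts.sum
    if top == 5 then 7
    else if top == 4 then 6
    else if top == 3 then (if (PySem.List.pyGet? counts (-2)).getD 0 == 2 then 5 else 4)
    else if top == 2 then (if (PySem.List.pyGet? counts (-2)).getD 0 == 2 then 3 else 2)
    else 1

lemma handsortA_eq (hand : List Int) :
    handsortA hand = hand.foldl (fun hs c => hs * 100 + c)
      (scoreA (((PySem.Set.ofList hand).filter (fun c => c != 1)).map
        (fun c => ((hand.filter (fun n => n == c)).length : Int)))) := rfl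

lemma jokerKey_eq (vals : List Int) :
    jokerKey vals = vals.foldl (fun k v => k * 100 + v)
      (scoreB (PySem.List.sorted (((PySem.Set.ofList vals).filter (fun c => c != 1)).map
        (fun c => (PySem.List.count vals c : Int))) (fun x => x) false)) := rfl

lemma score_eq (cs : List Int) (h1 : ∀ c ∈ cs, 1 ≤ c) (h2 : cs.sum ≤ 5) :
    scoreA cs = scoreB (PySem.List.sorted cs (fun x => x) false) := by
  match cs with
  | [] => decide
  | [a] =>
    have ha : 1 ≤ a := h1 a (by simp)
    have ha' : a ≤ 5 := by simp at h2; omega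
    interval_cases a <;> decide
  | [a, b] =>
    have ha : 1 ≤ a := h1 a (by simp)
    have hb : 1 ≤ b := h1 b (by simp)
    simp only [List.sum_cons, List.sum_nil, add_zero] at h2
    have ha' : a ≤ 4 := by omega
    have hb' : b ≤ 4 := by omega
    interval_cases a <;> interval_cases b <;> first | decide | omega
  | [a, b, c] =>
    have ha : 1 ≤ a := h1 a (by simp)
    have hb : 1 ≤ b := h1 b (by simp)
    have hc : 1 ≤ c := h1 c (by simp)
    simp only [List.sum_cons, List.sum_nil, add_zero] at h2
    have ha' : a ≤ 3 := by omega
    have hb' : b ≤ 3 := by omega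
    have hc' : c ≤ 3 := by omega
    interval_cases a <;> interval_cases b <;> interval_cases c <;> first | decide | omega
  | [a, b, c, d] =>
    have ha : 1 ≤ a := h1 a (by simp)
    have hb : 1 ≤ b := h1 b (by simp)
    have hc : 1 ≤ c := h1 c (by simp)
    have hd : 1 ≤ d := h1 d (by simp)
    simp only [List.sum_cons, List.sum_nil, add_zero] at h2
    have ha' : a ≤ 2 := by omega
    have hb' : b ≤ 2 := by omega
    have hc' : c ≤ 2 := by omega
    have hd' : d ≤ 2 := by omega
    interval_cases a <;> interval_cases b <;> interval_cases c <;> interval_cases d <;> decide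
  | [a, b, c, d, e] =>
    have ha : 1 ≤ a := h1 a (by simp)
    have hb : 1 ≤ b := h1 b (by simp)
    have hc : 1 ≤ c := h1 c (by simp)
    have hd : 1 ≤ d := h1 d (by simp)
    have he : 1 ≤ e := h1 e (by simp)
    simp only [List.sum_cons, List.sum_nil, add_zero] at h2
    have : a = 1 ∧ b = 1 ∧ c = 1 ∧ d = 1 ∧ e = 1 := by omega
    obtain ⟨rfl, rfl, rfl, rfl, rfl⟩ := this
    decide
  | a :: b :: c :: d :: e :: f :: t =>
    exfalso
    have ht : 0 ≤ t.sum := List.sum_nonneg (fun x hx => le_trans zero_le_one (h1 x (by simp [hx])))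
    have ha : 1 ≤ a := h1 a (by simp)
    have hb : 1 ≤ b := h1 b (by simp)
    have hc : 1 ≤ c := h1 c (by simp)
    have hd : 1 ≤ d := h1 d (by simp)
    have he : 1 ≤ e := h1 e (by simp)
    have hf : 1 ≤ f := h1 f (by simp)
    simp only [List.sum_cons] at h2
    omega

lemma mapcount_sum (l : List Int) (h' : List Int) (hnd : l.Nodup)
    (hmem : ∀ x ∈ h', x ∈ l) :
    (l.map (fun c => (h'.filter (fun n => n == c)).length)).sum = h'.length := by
  induction l generalizing h' with
  | nil =>
    have : h' = [] := by
      cases h' with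
      | nil => rfl
      | cons x t => exact absurd (hmem x (by simp)) (by simp)
    simp [this]
  | cons c t ih =>
    simp only [List.map_cons, List.sum_cons]
    have hrest : ∀ x ∈ t, (h'.filter (fun n => n == x)).length
        = ((h'.filter (fun n => n != c)).filter (fun n => n == x)).length := by
      intro x hx
      have hxc : x ≠ c := by
        rintro rfl; exact (List.nodup_cons.mp hnd).1 hx
      rw [List.filter_filter]
      congr 1
      apply List.filter_congr
      intro a _
      by_cases hax : a = x
      · subst hax; simp [hxc]
      · simp [hax]
    have hmap : t.map (fun x => (h'.filter (fun n => n == x)).length)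
        = t.map (fun x => ((h'.filter (fun n => n != c)).filter (fun n => n == x)).length) :=
      List.map_congr_left hrest
    rw [hmap, ih (h'.filter (fun n => n != c)) (List.nodup_cons.mp hnd).2]
    · have := List.length_eq_length_filter_add (l := h') (fun n => n == c)
      have hnot : (h'.filter (fun a => !(a == c))) = (h'.filter (fun n => n != c)) := by
        apply List.filter_congr; intro a _; simp [bne]
      rw [hnot] at this
      omega
    · intro x hx
      simp only [List.mem_filter, bne_iff_ne, ne_eq] at hx
      have := hmem x hx.1
      simp only [List.mem_cons] at this
      rcases this with h | h
      · exact absurd h hx.2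
      · exact h

lemma csOf_sum (hand : List Int) :
    ((((PySem.Set.ofList hand).filter (fun c => c != 1)).map
      (fun c => ((hand.filter (fun n => n == c)).length : Int))).sum)
      = ((hand.filter (fun c => c != 1)).length : Int) := by
  have hnd : ((PySem.Set.ofList hand).filter (fun c => c != 1)).Nodup :=
    (PySem.Set.nodup_ofList hand).filter _
  have hmem : ∀ x ∈ hand.filter (fun c => c != 1),
      x ∈ (PySem.Set.ofList hand).filter (fun c => c != 1) := by
    intro x hx
    simp only [List.mem_filter] at hx ⊢
    exact ⟨(PySem.Set.mem_ofList hand x).mpr hx.1, hx.2⟩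
  have hcount : ∀ c ∈ (PySem.Set.ofList hand).filter (fun c => c != 1),
      (hand.filter (fun n => n == c)).length
        = ((hand.filter (fun n => n != 1)).filter (fun n => n == c)).length := by
    intro c hc
    have hc1 : c ≠ 1 := by simpa using (List.mem_filter.mp hc).2
    rw [List.filter_filter]
    congr 1
    apply List.filter_congr
    intro a _
    by_cases hac : a = c
    · subst hac; simp [hc1]
    · simp [hac]
  calc (((PySem.Set.ofList hand).filter (fun c => c != 1)).map
      (fun c => ((hand.filter (fun n => n == c)).length : Int))).sum
      = ((((PySem.Set.ofList hand).filter (fun c => c != 1)).map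
        (fun c => (hand.filter (fun n => n == c)).length)).map (Nat.cast : Nat → Int)).sum := by
        rw [List.map_map]; rfl
    _ = (((((PySem.Set.ofList hand).filter (fun c => c != 1)).map
        (fun c => (hand.filter (fun n => n == c)).length)).sum : Nat) : Int) :=
        (Nat.cast_list_sum _).symm
    _ = _ := by
        congr 1
        have hmapc : (((PySem.Set.ofList hand).filter (fun c => c != 1)).map
            (fun c => (hand.filter (fun n => n == c)).length))
            = (((PySem.Set.ofList hand).filter (fun c => c != 1)).map
              (fun c => ((hand.filter (fun n => n != 1)).filter (fun n => n == c)).length)) :=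
          List.map_congr_left hcount
        rw [hmapc, mapcount_sum _ _ hnd]
        intro x hx
        exact hmem x hx

lemma csOf_pos (hand : List Int) :
    ∀ v ∈ (((PySem.Set.ofList hand).filter (fun c => c != 1)).map
      (fun c => ((hand.filter (fun n => n == c)).length : Int))), 1 ≤ v := by
  intro v hv
  simp only [List.mem_map] at hv
  obtain ⟨c, hc, rfl⟩ := hv
  have hcmem : c ∈ hand := (PySem.Set.mem_ofList hand c).mp (List.mem_filter.mp hc).1
  have : c ∈ hand.filter (fun n => n == c) := List.mem_filter.mpr ⟨hcmem, by simp⟩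
  have hpos : 0 < (hand.filter (fun n => n == c)).length := List.length_pos_of_mem this
  exact_mod_cast hpos

lemma hand_key_eq (hand : List Int) (h5 : (hand.filter (fun c => c != 1)).length ≤ 5) :
    handsortA hand = jokerKey hand := by
  rw [handsortA_eq, jokerKey_eq]
  congr 1
  have hcnt : (((PySem.Set.ofList hand).filter (fun c => c != 1)).map
      (fun c => (PySem.List.count hand c : Int)))
      = (((PySem.Set.ofList hand).filter (fun c => c != 1)).map
        (fun c => ((hand.filter (fun n => n == c)).length : Int))) := by
    apply List.map_congr_left
    intro c _
    congr 1
    simp [PySem.List.count, List.count, List.countP_eq_length_filter]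
  rw [hcnt]
  apply score_eq
  · exact csOf_pos hand
  · rw [csOf_sum]; exact_mod_cast h5

-- the card→value translation, as both ports compute it per character
lemma cardVal_J : PySem.Dict.getD cardVals 'J' 0 = 1 := by decide

lemma cardVal_ne_one (c : Char) (hc : c ∈ validCards) (hne : c ≠ 'J') :
    (PySem.Dict.getD cardVals c 0) ≠ 1 := by
  fin_cases hc <;> first | (exact absurd rfl hne) | decide

lemma cardVal_inj (a b : Char) (ha : a ∈ validCards) (hb : b ∈ validCards)
    (h : PySem.Dict.getD cardVals a 0 = PySem.Dict.getD cardVals b 0) : a = b := by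
  fin_cases ha <;> fin_cases hb <;> first | rfl | (exfalso; revert h; decide)

lemma filter_vals_len (chars : List Char) (hv : ∀ c ∈ chars, c ∈ validCards) :
    ((chars.map (fun c => PySem.Dict.getD cardVals c 0)).filter (fun v => v != 1)).length
      = (chars.filter (fun c => decide (c ≠ 'J'))).length := by
  rw [List.filter_map, List.length_map]
  congr 1
  apply List.filter_congr
  intro c hc
  simp only [Function.comp_apply]
  by_cases h : c = 'J'
  · subst h; simp [cardVal_J]
  · have hne := cardVal_ne_one c (hv c hc) h
    simp [bne_iff_ne, hne, h]

lemma map_vals_inj (l1 l2 : List Char) (h1 : ∀ c ∈ l1, c ∈ validCards)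
    (h2 : ∀ c ∈ l2, c ∈ validCards)
    (h : l1.map (fun c => PySem.Dict.getD cardVals c 0)
       = l2.map (fun c => PySem.Dict.getD cardVals c 0)) : l1 = l2 := by
  induction l1 generalizing l2 with
  | nil => cases l2 <;> simp_all
  | cons a t ih =>
    cases l2 with
    | nil => simp_all
    | cons b t2 =>
      simp only [List.map_cons, List.cons.injEq] at h
      have hab : a = b := cardVal_inj a b (h1 a (by simp)) (h2 b (by simp)) h.1
      subst hab
      rw [ih t2 (fun c hc => h1 c (List.mem_cons_of_mem _ hc))
        (fun c hc => h2 c (List.mem_cons_of_mem _ hc)) h.2]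

-- stable insertion respects a key-preserving map
lemma insertBy_map {α β : Type} (g : α → β) (bf : α → α → Bool) (bf' : β → β → Bool)
    (h : ∀ a b, bf' (g a) (g b) = bf a b) (x : α) (ys : List α) :
    (PySem.List.insertBy bf x ys).map g = PySem.List.insertBy bf' (g x) (ys.map g) := by
  induction ys with
  | nil => rfl
  | cons y t ih =>
    simp only [PySem.List.insertBy, List.map_cons, h]
    by_cases hb : bf x y = true
    · simp [hb]
    · simp only [Bool.not_eq_true] at hb
      simp [hb, ih]

lemma sorted_map_key {α β : Type} (g : α → β) (key : α → Int) (key' : β → Int)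
    (h : ∀ a, key' (g a) = key a) (l : List α) :
    PySem.List.sorted (l.map g) key' false = (PySem.List.sorted l key false).map g := by
  rw [PySem.List.sorted_eq_foldl_insertBy, PySem.List.sorted_eq_foldl_insertBy]
  suffices H : ∀ acc : List α,
      List.foldl (fun acc x => PySem.List.insertBy (fun a b => decide (key' a < key' b)) x acc)
        (acc.map g) (l.map g)
      = (List.foldl (fun acc x => PySem.List.insertBy (fun a b => decide (key a < key b)) x acc)
        acc l).map g by
    simpa using H []
  induction l with
  | nil => intro acc; rfl
  | cons x t ih =>
    intro acc
    simp only [List.map_cons, List.foldl_cons]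
    rw [← insertBy_map g (fun a b => decide (key a < key b))
      (fun a b => decide (key' a < key' b)) (by intro a b; simp [h]) x acc]
    exact ih _

lemma enumerate_map_sum {α β : Type} (g : α → β) (F : β → Int) :
    ∀ (l : List α) (n : Int),
    ((PySem.List.enumerate (l.map g) n).map (fun p => (p.1 + 1) * F p.2)).sum
      = ((PySem.List.enumerate l n).map (fun p => (p.1 + 1) * F (g p.2))).sum := by
  intro l
  induction l with
  | nil => intro n; rfl
  | cons x t ih =>
    intro n
    simp only [List.map_cons, PySem.List.enumerate, List.sum_cons, ih]


-- shorthands for the two ports' per-line parses (proof-side only)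
def pvHandStr (line : String) : String := ((PySem.Str.split? line " ").getD []).getD 0 ""
def pvVals (line : String) : List Int :=
  (pvHandStr line).toList.map (fun c => PySem.Dict.getD cardVals c 0)
def pvBet (line : String) : Int :=
  (PySem.Int.ofStr? (((PySem.Str.split? line " ").getD []).getD 1 "")).getD 0

theorem part2_agree (data : List String) (hpre : Pre_part2 data) :
    part2 data = part2_alt data := by
  obtain ⟨hl, hnd⟩ := hpre
  simp only [part2, part2_alt]
  have hA : (fun (st : List (List Int) × PySem.Dict (List Int) Int) line =>
      (st.1 ++ [((((PySem.Str.split? line " ").getD []).getD 0 "").toList.map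
          (fun c => PySem.Dict.getD cardVals c 0))],
        st.2.insert
          ((((PySem.Str.split? line " ").getD []).getD 0 "").toList.map
            (fun c => PySem.Dict.getD cardVals c 0))
          ((PySem.Int.ofStr? (((PySem.Str.split? line " ").getD []).getD 1 "")).getD 0)))
      = fun (st : List (List Int) × PySem.Dict (List Int) Int) line =>
        (st.1 ++ [pvVals line], st.2.insert (pvVals line) (pvBet line)) := rfl
  have hB : (fun (rows : List (Int × Int)) line =>
      rows ++ [(jokerKey ((((PySem.Str.split? line " ").getD []).getD 0 "").toList.map
          (fun c => PySem.Dict.getD cardVals c 0)),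
        (PySem.Int.ofStr? (((PySem.Str.split? line " ").getD []).getD 1 "")).getD 0)])
      = fun (rows : List (Int × Int)) line =>
        rows ++ [(jokerKey (pvVals line), pvBet line)] := rfl
  rw [hA, hB]
  rw [PySem.List.foldl_prod_mk
      (f := fun (acc : List (List Int)) line => acc ++ [pvVals line])
      (g := fun (d : PySem.Dict (List Int) Int) line => d.insert (pvVals line) (pvBet line))]
  rw [PySem.List.foldl_append_singleton_eq_map (f := pvVals)]
  rw [PySem.List.foldl_append_singleton_eq_map
    (f := fun line => (jokerKey (pvVals line), pvBet line))]
  simp only [List.nil_append]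
  set bets := data.foldl
    (fun (d : PySem.Dict (List Int) Int) line => d.insert (pvVals line) (pvBet line))
    PySem.Dict.empty with hbetsdef
  have hvalid : ∀ line ∈ data, ∀ c ∈ (pvHandStr line).toList, c ∈ validCards := by
    intro line hmem c hc
    have := (hl line hmem).2.1
    rw [List.all_eq_true] at this
    simpa using this c hc
  have hvnodup : (data.map pvVals).Nodup := by
    have hmm : data.map pvVals
        = (data.map (fun line => ((PySem.Str.split? line " ").getD []).getD 0 "")).map
          (fun s => s.toList.map (fun c => PySem.Dict.getD cardVals c 0)) := by
      rw [List.map_map]; rfl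
    rw [hmm]
    apply List.Nodup.map_on _ hnd
    intro s1 hs1 s2 hs2 heq
    obtain ⟨l1, hl1, rfl⟩ := List.mem_map.mp hs1
    obtain ⟨l2, hl2, rfl⟩ := List.mem_map.mp hs2
    apply String.toList_inj.mp
    exact map_vals_inj _ _ (hvalid l1 hl1) (hvalid l2 hl2) heq
  have hitems : bets.items = data.map (fun line => (pvVals line, pvBet line)) := by
    rw [hbetsdef]
    exact PySem.Dict.items_foldl_insert_fresh data pvVals pvBet PySem.Dict.empty
      (by intro a _; simp [PySem.Dict.contains_empty]) hvnodup
  have hkeysnd : bets.keys.Nodup := by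
    simp only [PySem.Dict.keys, hitems, List.map_map]
    exact hvnodup
  have hget : ∀ line ∈ data, bets.getD (pvVals line) 0 = pvBet line := by
    intro line hmem
    refine PySem.Dict.getD_of_mem_items bets ?_ hkeysnd 0
    rw [hitems]
    exact List.mem_map_of_mem hmem
  have hrows : data.map (fun line => (jokerKey (pvVals line), pvBet line))
      = (data.map pvVals).map (fun h => (handsortA h, bets.getD h 0)) := by
    rw [List.map_map]
    apply List.map_congr_left
    intro line hmem
    have h5 : ((pvVals line).filter (fun v => v != 1)).length ≤ 5 := by
      have := filter_vals_len (pvHandStr line).toList (hvalid line hmem)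
      unfold pvVals
      rw [this]
      exact (hl line hmem).2.2.2
    have hkey : handsortA (pvVals line) = jokerKey (pvVals line) := hand_key_eq _ h5
    simp only [Function.comp_apply, hkey, hget line hmem]
  rw [hrows, sorted_map_key (fun h => (handsortA h, bets.getD h 0)) handsortA
    (fun r => r.1) (fun a => rfl)]
  rw [enumerate_map_sum (fun h => (handsortA h, bets.getD h 0)) (fun r => r.2)]

-- ===== VERDICT (by name: the statement is the Claim_ definition above) =====
theorem part2_spec : Claim_equal_part2 := by
  intro data _ hpre
  exact part2_agree data hpre
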